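-- pv_equiv track=rewrite | github.com/JonathanHancock0/AoC2015 | 5.py | twoPairsTest
-- ===== SOURCE A (Python) =====
-- def twoPairsTest(line):
--     #There must be two copies of a pair of letters
--     n = len(line)
--     for i in range(n-3):
--         t1 = line[i]
--         t2 = line[i+1]
--         for j in range(i+2,n-1):
--             if (line[j] == t1) and (line[j+1] == t2):
--                 return True
--
--     return False
-- ===== SOURCE B (Python) =====
-- def twoPairsTest(line):
--     # Single pass: remember the first index of each letter pair; a repeat at
--     # distance >= 2 means two non-overlapping copies exist.
--     first = {}
--     for i in range(len(line) - 1):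
--         pair = (line[i], line[i + 1])
--         if pair in first:
--             if i - first[pair] >= 2:
--                 return True
--         else:
--             first[pair] = i
--     return False
-- ===== Notes on version B (the rewrite author's own statement) =====
-- stated objective: faster
-- what changed: Replaced A's nested scan over all index pairs by a single left-to-right pass that memoises the first index of each letter pair in a dict and returns True when the pair recurs at distance >= 2.
import Mathlib
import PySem

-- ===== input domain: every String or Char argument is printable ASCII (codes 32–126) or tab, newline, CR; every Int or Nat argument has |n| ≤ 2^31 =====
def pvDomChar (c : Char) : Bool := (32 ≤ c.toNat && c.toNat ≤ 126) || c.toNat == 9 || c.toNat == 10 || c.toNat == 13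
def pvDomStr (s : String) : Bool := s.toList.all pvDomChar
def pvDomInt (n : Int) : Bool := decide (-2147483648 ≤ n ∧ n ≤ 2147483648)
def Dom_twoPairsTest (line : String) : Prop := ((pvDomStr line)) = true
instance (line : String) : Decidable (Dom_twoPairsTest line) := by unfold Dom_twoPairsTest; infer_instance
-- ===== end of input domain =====

-- B replaces A's quadratic nested index scan by a single pass that memoises the
-- first index of each letter pair in a dict and fires when a repeat is ≥ 2 away.

-- ===== PORT A =====
def twoPairsTest (line : String) : Bool :=
  let n : Int := PySem.Str.len line
  (PySem.List.pyRange 0 (n - 3) 1).any fun i =>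
    let t1 := PySem.Str.pyGet? line i
    let t2 := PySem.Str.pyGet? line (i + 1)
    (PySem.List.pyRange (i + 2) (n - 1) 1).any fun j =>
      (PySem.Str.pyGet? line j == t1) && (PySem.Str.pyGet? line (j + 1) == t2)

-- ===== PORT B =====
-- the loop of Source B with its early return, recursing over the index list
def pvLoopB (line : String) (d : PySem.Dict (Option Char × Option Char) Int) :
    List Int → Bool
  | [] => false
  | i :: rest =>
    let pair := (PySem.Str.pyGet? line i, PySem.Str.pyGet? line (i + 1))
    match d.get? pair with
    | some i0 => if 2 ≤ i - i0 then true else pvLoopB line d rest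
    | none => pvLoopB line (d.insert pair i) rest

def twoPairsTest_alt (line : String) : Bool :=
  pvLoopB line PySem.Dict.empty
    (PySem.List.pyRange 0 (PySem.Str.len line - 1) 1)

-- ===== PRECONDITION & SPEC =====
def Spec_twoPairsTest (line : String) (out : Bool) : Prop := out = twoPairsTest_alt line
instance (line : String) (out : Bool) : Decidable (Spec_twoPairsTest line out) := by unfold Spec_twoPairsTest; infer_instance

-- ===== CLAIM (what is proved, stated in full; the proofs are below) =====
def Claim_equal_twoPairsTest : Prop := ∀ (line : String), Dom_twoPairsTest line → Spec_twoPairsTest line (twoPairsTest line)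

-- ===== LEMMAS AND PROOFS =====

-- the letter pair starting at index i (as B's dict key)
def pvPair (line : String) (i : Int) : Option Char × Option Char :=
  (PySem.Str.pyGet? line i, PySem.Str.pyGet? line (i + 1))

-- both programs decide this proposition
def pvHasMatch (line : String) (k m : Int) : Prop :=
  ∃ i j : Int, 0 ≤ i ∧ i + 2 ≤ j ∧ k ≤ j ∧ j < m ∧ pvPair line i = pvPair line j

-- a decidable predicate true somewhere on [0, k) has a least witness there
theorem pvLeast (P : Int → Prop) [DecidablePred P] (k : Int)
    (h : ∃ i, 0 ≤ i ∧ i < k ∧ P i) :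
    ∃ i0, 0 ≤ i0 ∧ i0 < k ∧ P i0 ∧ ∀ i', 0 ≤ i' → i' < k → P i' → i0 ≤ i' := by
  obtain ⟨i, hi0, hik, hPi⟩ := h
  have hex : ∃ m : Nat, (m : Int) < k ∧ P (m : Int) :=
    ⟨i.toNat, by rw [Int.toNat_of_nonneg hi0]; exact ⟨hik, hPi⟩⟩
  obtain ⟨hmk, hPm⟩ := Nat.find_spec hex
  refine ⟨(Nat.find hex : Nat), by positivity, hmk, hPm, ?_⟩
  intro i' h0 hk hP
  have := Nat.find_min' hex (m := i'.toNat)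
    (by rw [Int.toNat_of_nonneg h0]; exact ⟨hk, hP⟩)
  omega

-- B's dict invariant: d maps each pair to its least index among [0, k)
def pvInv (line : String) (k : Int)
    (d : PySem.Dict (Option Char × Option Char) Int) : Prop :=
  ∀ p i0, d.get? p = some i0 ↔
    (0 ≤ i0 ∧ i0 < k ∧ pvPair line i0 = p ∧
      ∀ i', 0 ≤ i' → i' < k → pvPair line i' = p → i0 ≤ i')

theorem pvA_iff (line : String) :
    twoPairsTest line = true ↔ pvHasMatch line 0 (PySem.Str.len line - 1) := by
  unfold twoPairsTest pvHasMatch pvPair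
  simp only [List.any_eq_true, PySem.List.mem_pyRange_one, Bool.and_eq_true, beq_iff_eq]
  constructor
  · rintro ⟨i, ⟨hi0, hi3⟩, j, ⟨hij, hjn⟩, h1, h2⟩
    exact ⟨i, j, hi0, hij, by omega, hjn, by rw [h1, h2]⟩
  · rintro ⟨i, j, hi0, hij, hj0, hjn, heq⟩
    obtain ⟨h1, h2⟩ := Prod.mk.injEq .. ▸ heq
    exact ⟨i, ⟨hi0, by omega⟩, j, ⟨hij, hjn⟩, h1.symm, h2.symm⟩

theorem pvLoop_iff (line : String) (m : Int) :
    ∀ (fuel : Nat) (k : Int) d, (m - k).toNat = fuel → 0 ≤ k →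
      pvInv line k d →
      (pvLoopB line d (PySem.List.pyRange k m 1) = true ↔ pvHasMatch line k m) := by
  intro fuel
  induction fuel with
  | zero =>
    intro k d hf hk0 _
    rw [PySem.List.pyRange_one_eq_nil (by omega)]
    simp only [pvLoopB]
    constructor
    · intro h; exact absurd h (by simp)
    · rintro ⟨i, j, _, _, hkj, hjm, _⟩; omega
  | succ fuel ih =>
    intro k d hf hk0 hinv
    have hkm : k < m := by omega
    rw [PySem.List.pyRange_one_cons hkm]
    show (match d.get? (pvPair line k) with
      | some i0 => if 2 ≤ k - i0 then true else pvLoopB line d (PySem.List.pyRange (k+1) m 1)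
      | none => pvLoopB line (d.insert (pvPair line k) k) (PySem.List.pyRange (k+1) m 1)) = true
      ↔ pvHasMatch line k m
    cases hget : d.get? (pvPair line k) with
    | some i0 =>
      obtain ⟨hi00, hi0k, hpi0, hmin⟩ := (hinv _ _).mp hget
      by_cases hgap : 2 ≤ k - i0
      · simp only [hgap, if_true]
        constructor
        · intro _; exact ⟨i0, k, hi00, by omega, le_refl _, hkm, hpi0⟩
        · intro _; trivial
      · have hi0 : i0 = k - 1 := by omega
        simp only [hgap, if_false]
        have hinv' : pvInv line (k + 1) d := by
          intro p j0
          rw [hinv p j0]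
          constructor
          · rintro ⟨h1, h2, h3, h4⟩
            refine ⟨h1, by omega, h3, ?_⟩
            intro i' h0 hk1 hp
            by_cases h : i' = k
            · omega
            · exact h4 i' h0 (by omega) hp
          · rintro ⟨h1, h2, h3, h4⟩
            refine ⟨h1, ?_, h3, ?_⟩
            · by_cases h : j0 = k
              · exfalso
                subst h
                have := h4 i0 hi00 (by omega) (h3 ▸ hpi0)
                omega
              · omega
            · intro i' h0 hk1 hp
              exact h4 i' h0 (by omega) hp
        rw [ih (k + 1) d (by omega) (by omega) hinv']
        unfold pvHasMatch
        constructor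
        · rintro ⟨i, j, h1, h2, h3, h4, h5⟩
          exact ⟨i, j, h1, h2, by omega, h4, h5⟩
        · rintro ⟨i, j, h1, h2, h3, h4, h5⟩
          refine ⟨i, j, h1, h2, ?_, h4, h5⟩
          by_cases h : j = k
          · exfalso
            subst h
            have := hmin i h1 (by omega) h5
            omega
          · omega
    | none =>
      have hnone : ¬ ∃ i, 0 ≤ i ∧ i < k ∧ pvPair line i = pvPair line k := by
        intro hex
        obtain ⟨i0, h1, h2, h3, h4⟩ := pvLeast (fun i => pvPair line i = pvPair line k) k hex
        have := (hinv (pvPair line k) i0).mpr ⟨h1, h2, h3, h4⟩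
        rw [hget] at this
        simp at this
      have hinv' : pvInv line (k + 1) (d.insert (pvPair line k) k) := by
        intro p j0
        rw [PySem.Dict.get?_insert]
        by_cases hp : p = pvPair line k
        · rw [if_pos hp]
          constructor
          · intro h
            have hj0 : j0 = k := by
              have := Option.some.inj h
              omega
            refine ⟨by omega, by omega, by rw [hj0, hp], ?_⟩
            intro i' h0 hk1 hpi'
            by_cases h : i' = k
            · omega
            · exact absurd ⟨i', h0, by omega, hp ▸ hpi'⟩ hnone
          · rintro ⟨h1, h2, h3, h4⟩
            by_cases h : j0 = k
            · rw [h]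
            · exact absurd ⟨j0, h1, by omega, hp ▸ h3⟩ hnone
        · rw [if_neg hp]
          rw [hinv p j0]
          constructor
          · rintro ⟨h1, h2, h3, h4⟩
            refine ⟨h1, by omega, h3, ?_⟩
            intro i' h0 hk1 hpi'
            by_cases h : i' = k
            · exact absurd (h ▸ hpi').symm hp
            · exact h4 i' h0 (by omega) hpi'
          · rintro ⟨h1, h2, h3, h4⟩
            refine ⟨h1, ?_, h3, ?_⟩
            · by_cases h : j0 = k
              · exact absurd (h ▸ h3).symm hp
              · omega
            · intro i' h0 hk1 hpi'
              exact h4 i' h0 (by omega) hpi'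
      rw [ih (k + 1) _ (by omega) (by omega) hinv']
      unfold pvHasMatch
      constructor
      · rintro ⟨i, j, h1, h2, h3, h4, h5⟩
        exact ⟨i, j, h1, h2, by omega, h4, h5⟩
      · rintro ⟨i, j, h1, h2, h3, h4, h5⟩
        refine ⟨i, j, h1, h2, ?_, h4, h5⟩
        by_cases h : j = k
        · exact absurd ⟨i, h1, by omega, h ▸ h5⟩ hnone
        · omega

theorem pvB_iff (line : String) :
    twoPairsTest_alt line = true ↔ pvHasMatch line 0 (PySem.Str.len line - 1) := by
  unfold twoPairsTest_alt
  refine pvLoop_iff line (PySem.Str.len line - 1) _ 0 PySem.Dict.empty rfl (le_refl 0) ?_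
  intro p i0
  rw [PySem.Dict.get?_empty]
  constructor
  · intro h; simp at h
  · rintro ⟨h1, h2, _, _⟩; omega

-- ===== VERDICT (by name: the statement is the Claim_ definition above) =====
theorem twoPairsTest_spec : Claim_equal_twoPairsTest := by
  intro line _
  unfold Spec_twoPairsTest
  have ha := pvA_iff line
  have hb := pvB_iff line
  cases h : twoPairsTest_alt line with
  | true => exact (ha.mpr (hb.mp h))
  | false =>
    cases h2 : twoPairsTest line with
    | false => rfl
    | true => rw [hb.mpr (ha.mp h2)] at h; simp at h
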